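-- pv_equiv track=rewrite | github.com/linlelest/Miniread | services/book_parser.py | _fb2_to_html
-- ===== SOURCE A (Python) =====
-- def _fb2_to_html(fb2_xml):
--     """将FB2 XML内容转换为HTML"""
--     html = fb2_xml
--     # 转换常见的FB2标签
--     replacements = [
--         ('<section>', '<div>'), ('</section>', '</div>'),
--         ('<title>', '<h3>'), ('</title>', '</h3>'),
--         ('<subtitle>', '<h4>'), ('</subtitle>', '</h4>'),
--         ('<p>', '<p>'), ('</p>', '</p>'),
--         ('<emphasis>', '<i>'), ('</emphasis>', '</i>'),
--         ('<strong>', '<b>'), ('</strong>', '</b>'),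
--         ('<strikethrough>', '<s>'), ('</strikethrough>', '</s>'),
--         ('<epigraph>', '<blockquote>'), ('</epigraph>', '</blockquote>'),
--         ('<cite>', '<cite>'), ('</cite>', '</cite>'),
--         ('<poem>', '<div class="poem">'), ('</poem>', '</div>'),
--         ('<stanza>', '<div class="stanza">'), ('</stanza>', '</div>'),
--         ('<v>', '<p class="verse">'), ('</v>', '</p>'),
--         ('<empty-line/>', '<br/>'),
--         ('<image', '<img'),  # 简化处理
--     ]
--     for old, new in replacements:
--         html = html.replace(old, new)
--
--     return html
-- ===== SOURCE B (Python) =====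
-- def _fb2_to_html(fb2_xml):
--     """将FB2 XML内容转换为HTML"""
--     # Same 24 tag pairs, but applied in ONE left-to-right scan with a
--     # first-match dispatch instead of 24 full string passes.
--     mapping = [
--         ('<section>', '<div>'), ('</section>', '</div>'),
--         ('<title>', '<h3>'), ('</title>', '</h3>'),
--         ('<subtitle>', '<h4>'), ('</subtitle>', '</h4>'),
--         ('<p>', '<p>'), ('</p>', '</p>'),
--         ('<emphasis>', '<i>'), ('</emphasis>', '</i>'),
--         ('<strong>', '<b>'), ('</strong>', '</b>'),
--         ('<strikethrough>', '<s>'), ('</strikethrough>', '</s>'),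
--         ('<epigraph>', '<blockquote>'), ('</epigraph>', '</blockquote>'),
--         ('<cite>', '<cite>'), ('</cite>', '</cite>'),
--         ('<poem>', '<div class="poem">'), ('</poem>', '</div>'),
--         ('<stanza>', '<div class="stanza">'), ('</stanza>', '</div>'),
--         ('<v>', '<p class="verse">'), ('</v>', '</p>'),
--         ('<empty-line/>', '<br/>'),
--         ('<image', '<img'),
--     ]
--     out = []
--     i = 0
--     n = len(fb2_xml)
--     while i < n:
--         for old, new in mapping:
--             if fb2_xml.startswith(old, i):
--                 out.append(new)
--                 i += len(old)
--                 break
--         else: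
--             out.append(fb2_xml[i])
--             i += 1
--     return ''.join(out)
-- ===== Notes on version B (the rewrite author's own statement) =====
-- stated objective: alternative
-- what changed: A makes 24 sequential full-string replace passes (one str.replace per tag pair); B does a single left-to-right scan over the input, dispatching at each position on the first of the same 24 tag pairs whose key starts there (sound because every key and every replacement contains '<' only at its start and no replacement text strictly extends into a later key).
import Mathlib
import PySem

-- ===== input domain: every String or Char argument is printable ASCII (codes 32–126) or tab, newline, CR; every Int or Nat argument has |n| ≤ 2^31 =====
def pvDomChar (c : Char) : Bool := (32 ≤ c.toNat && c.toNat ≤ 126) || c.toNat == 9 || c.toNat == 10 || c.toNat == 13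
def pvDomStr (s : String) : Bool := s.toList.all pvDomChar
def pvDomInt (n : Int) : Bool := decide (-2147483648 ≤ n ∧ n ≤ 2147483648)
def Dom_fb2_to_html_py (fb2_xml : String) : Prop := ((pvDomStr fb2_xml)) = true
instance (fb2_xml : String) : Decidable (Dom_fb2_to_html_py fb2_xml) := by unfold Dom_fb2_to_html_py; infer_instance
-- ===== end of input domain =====

-- B replaces A's 24 sequential full-string replace passes by ONE left-to-right scan
-- with a first-match dispatch over the same 24 tag pairs (objective: alternative).

-- ===== PORT A =====
def pvReplacements : List (String × String) :=
  [("<section>", "<div>"), ("</section>", "</div>"),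
   ("<title>", "<h3>"), ("</title>", "</h3>"),
   ("<subtitle>", "<h4>"), ("</subtitle>", "</h4>"),
   ("<p>", "<p>"), ("</p>", "</p>"),
   ("<emphasis>", "<i>"), ("</emphasis>", "</i>"),
   ("<strong>", "<b>"), ("</strong>", "</b>"),
   ("<strikethrough>", "<s>"), ("</strikethrough>", "</s>"),
   ("<epigraph>", "<blockquote>"), ("</epigraph>", "</blockquote>"),
   ("<cite>", "<cite>"), ("</cite>", "</cite>"),
   ("<poem>", "<div class=\"poem\">"), ("</poem>", "</div>"),
   ("<stanza>", "<div class=\"stanza\">"), ("</stanza>", "</div>"),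
   ("<v>", "<p class=\"verse\">"), ("</v>", "</p>"),
   ("<empty-line/>", "<br/>"),
   ("<image", "<img")]

def fb2_to_html_py (fb2_xml : String) : String :=
  pvReplacements.foldl (fun html p => PySem.Str.replace html p.1 p.2) fb2_xml

-- ===== PORT B =====
def pvMapping : List (List Char × List Char) :=
  [("<section>".toList, "<div>".toList), ("</section>".toList, "</div>".toList),
   ("<title>".toList, "<h3>".toList), ("</title>".toList, "</h3>".toList),
   ("<subtitle>".toList, "<h4>".toList), ("</subtitle>".toList, "</h4>".toList),
   ("<p>".toList, "<p>".toList), ("</p>".toList, "</p>".toList),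
   ("<emphasis>".toList, "<i>".toList), ("</emphasis>".toList, "</i>".toList),
   ("<strong>".toList, "<b>".toList), ("</strong>".toList, "</b>".toList),
   ("<strikethrough>".toList, "<s>".toList), ("</strikethrough>".toList, "</s>".toList),
   ("<epigraph>".toList, "<blockquote>".toList), ("</epigraph>".toList, "</blockquote>".toList),
   ("<cite>".toList, "<cite>".toList), ("</cite>".toList, "</cite>".toList),
   ("<poem>".toList, "<div class=\"poem\">".toList), ("</poem>".toList, "</div>".toList),
   ("<stanza>".toList, "<div class=\"stanza\">".toList), ("</stanza>".toList, "</div>".toList),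
   ("<v>".toList, "<p class=\"verse\">".toList), ("</v>".toList, "</p>".toList),
   ("<empty-line/>".toList, "<br/>".toList),
   ("<image".toList, "<img".toList)]

-- one pass over the characters: at each position, the FIRST pair whose key starts
-- here is emitted and the key consumed, otherwise the character is copied
def pvScan (pairs : List (List Char × List Char)) : List Char → List Char
  | [] => []
  | c :: t =>
    match pairs.find? (fun p => p.1.isPrefixOf (c :: t)) with
    | some p => p.2 ++ pvScan pairs (t.drop (p.1.length - 1))
    | none => c :: pvScan pairs t
termination_by cs => cs.length
decreasing_by
  · simp only [List.length_cons, List.length_drop]; omega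
  · simp only [List.length_cons]; omega

def fb2_to_html_py_alt (fb2_xml : String) : String :=
  String.ofList (pvScan pvMapping fb2_xml.toList)

-- ===== PRECONDITION & SPEC =====
def Spec_fb2_to_html_py (fb2_xml : String) (out : String) : Prop := out = fb2_to_html_py_alt fb2_xml
instance (fb2_xml : String) (out : String) : Decidable (Spec_fb2_to_html_py fb2_xml out) := by unfold Spec_fb2_to_html_py; infer_instance

-- ===== CLAIM (what is proved, stated in full; the proofs are below) =====
def Claim_equal_fb2_to_html_py : Prop := ∀ (fb2_xml : String), Dom_fb2_to_html_py fb2_xml → Spec_fb2_to_html_py fb2_xml (fb2_to_html_py fb2_xml)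

-- ===== LEMMAS AND PROOFS =====

-- proof-side reformulation of Python str.replace (PySem.Chars.replace) for a
-- nonempty needle, in the same recursion shape as pvScan
def pvRepl (old new : List Char) : List Char → List Char
  | [] => []
  | c :: t =>
    if old.isPrefixOf (c :: t) then new ++ pvRepl old new (t.drop (old.length - 1))
    else c :: pvRepl old new t
termination_by cs => cs.length
decreasing_by
  · simp only [List.length_cons, List.length_drop]; omega
  · simp only [List.length_cons]; omega

lemma pvRepl_go (old new : List Char) (hold : old ≠ []) :
    ∀ (fuel : ℕ) (l acc : List Char), l.length ≤ fuel →
      PySem.Chars.replace.go old new fuel l acc = acc.reverse ++ pvRepl old new l := by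
  intro fuel
  induction fuel with
  | zero =>
    intro l acc hl
    have hnil : l = [] := by cases l with | nil => rfl | cons a b => simp at hl
    subst hnil
    simp [PySem.Chars.replace.go, pvRepl]
  | succ n ih =>
    intro l acc hl
    cases l with
    | nil => simp [PySem.Chars.replace.go, pvRepl]
    | cons c t =>
      rw [PySem.Chars.replace.go]
      have holen : 1 ≤ old.length := by
        cases old with
        | nil => exact absurd rfl hold
        | cons a b => simp
      simp only [List.length_cons] at hl
      by_cases h : old.isPrefixOf (c :: t)
      · rw [if_pos h]
        have hdrop : (c :: t).drop old.length = t.drop (old.length - 1) := by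
          cases hoo : old.length with
          | zero => omega
          | succ k => simp
        rw [hdrop]
        rw [ih _ _ (by simp only [List.length_drop]; omega)]
        rw [pvRepl, if_pos h]
        simp
      · rw [if_neg h]
        rw [ih _ _ (by omega)]
        rw [pvRepl, if_neg h]
        simp

lemma replace_eq_pvRepl (old new s : List Char) (hold : old ≠ []) :
    PySem.Chars.replace s old new = pvRepl old new s := by
  unfold PySem.Chars.replace
  rw [if_neg (by simp [List.isEmpty_iff, hold])]
  rw [pvRepl_go old new hold s.length s [] le_rfl]
  simp

lemma pvRepl_append_no_lt (old new r Z : List Char)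
    (ho : old.head? = some '<') (hr : '<' ∉ r) :
    pvRepl old new (r ++ Z) = r ++ pvRepl old new Z := by
  induction r with
  | nil => simp
  | cons d r' ihr =>
    have hd : ¬ old.isPrefixOf (d :: (r' ++ Z)) = true := by
      intro hpre
      have hpp := List.isPrefixOf_iff_prefix.mp hpre
      cases old with
      | nil => simp at ho
      | cons o ot =>
        have ho' : o = '<' := by simpa using ho
        have : o = d := (List.cons_prefix_cons.mp hpp).1
        exact hr (by simp [← this, ho'])
    rw [List.cons_append, pvRepl, if_neg hd]
    rw [ihr (fun hm => hr (List.mem_cons_of_mem _ hm))]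
    simp

lemma pvRepl_pass (old new pre Z : List Char)
    (ho : old.head? = some '<') (hp : pre.head? = some '<') (hp2 : '<' ∉ pre.drop 1)
    (h1 : ¬ old <+: pre) (h2 : ¬ pre <+: old) :
    pvRepl old new (pre ++ Z) = pre ++ pvRepl old new Z := by
  cases pre with
  | nil => simp at hp
  | cons a r =>
    have ha : a = '<' := by simpa using hp
    subst ha
    have hnot : ¬ old.isPrefixOf ('<' :: (r ++ Z)) = true := by
      intro hpre
      have hpp : old <+: ('<' :: r) ++ Z := by
        simpa using List.isPrefixOf_iff_prefix.mp hpre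
      rcases List.prefix_or_prefix_of_prefix hpp (List.prefix_append _ _) with hc | hc
      · exact h1 hc
      · exact h2 hc
    rw [List.cons_append, pvRepl, if_neg hnot]
    rw [pvRepl_append_no_lt old new r Z ho (by simpa using hp2)]
    simp

lemma pvRepl_head (old new Z : List Char) (hold : old ≠ []) :
    pvRepl old new (old ++ Z) = new ++ pvRepl old new Z := by
  cases old with
  | nil => exact absurd rfl hold
  | cons o ot =>
    rw [List.cons_append, pvRepl,
      if_pos (by
        rw [List.isPrefixOf_iff_prefix, ← List.cons_append]
        exact List.prefix_append (o :: ot) Z)]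
    simp

lemma pvScan_cons_some {P : List (List Char × List Char)} {c : Char} {t : List Char}
    {p : List Char × List Char}
    (h : List.find? (fun p => p.1.isPrefixOf (c :: t)) P = some p) :
    pvScan P (c :: t) = p.2 ++ pvScan P (t.drop (p.1.length - 1)) := by
  rw [pvScan, h]

lemma pvScan_cons_none {P : List (List Char × List Char)} {c : Char} {t : List Char}
    (h : List.find? (fun p => p.1.isPrefixOf (c :: t)) P = none) :
    pvScan P (c :: t) = c :: pvScan P t := by
  rw [pvScan, h]

lemma pvScan_nil_pairs : ∀ cs, pvScan [] cs = cs := by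
  intro cs
  induction cs with
  | nil => simp [pvScan]
  | cons c t ih => rw [pvScan]; simp [ih]

lemma pvScan_append_no_lt (P : List (List Char × List Char)) (r u : List Char)
    (hk : ∀ p ∈ P, p.1.head? = some '<') (hr : '<' ∉ r) :
    pvScan P (r ++ u) = r ++ pvScan P u := by
  induction r with
  | nil => simp
  | cons d r' ihr =>
    have hfind : (P.find? fun p => p.1.isPrefixOf (d :: (r' ++ u))) = none := by
      rw [List.find?_eq_none]
      intro p hp hpre
      have hpp := List.isPrefixOf_iff_prefix.mp hpre
      have hh := hk p hp
      cases hp1 : p.1 with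
      | nil => simp [hp1] at hh
      | cons o ot =>
        rw [hp1] at hpp hh
        have ho : o = '<' := by simpa using hh
        have : o = d := (List.cons_prefix_cons.mp hpp).1
        exact hr (by simp [← this, ho])
    rw [List.cons_append, pvScan_cons_none hfind]
    rw [ihr (fun hm => hr (List.mem_cons_of_mem _ hm))]
    simp

lemma pvScan_pass (P : List (List Char × List Char)) (x u : List Char)
    (hk : ∀ p ∈ P, p.1.head? = some '<') (hx : '<' ∉ x.drop 1)
    (h0 : ∀ p ∈ P, ¬ p.1 <+: (x ++ u)) :
    pvScan P (x ++ u) = x ++ pvScan P u := by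
  cases x with
  | nil => simp
  | cons c x' =>
    have hfind : (P.find? fun p => p.1.isPrefixOf (c :: (x' ++ u))) = none := by
      rw [List.find?_eq_none]
      intro p hp hpre
      exact h0 p hp (by simpa using List.isPrefixOf_iff_prefix.mp hpre)
    rw [List.cons_append, pvScan_cons_none hfind]
    rw [pvScan_append_no_lt P x' u hk (by simpa using hx)]
    simp

lemma pvScan_prefix (P : List (List Char × List Char))
    (h2 : ∀ p ∈ P, p.2.head? = some '<') :
    ∀ (n : ℕ) (cs x : List Char), cs.length ≤ n → '<' ∉ x →
      x <+: pvScan P cs → x <+: cs := by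
  intro n
  induction n with
  | zero =>
    intro cs x hcs hx hpre
    have hnil : cs = [] := by cases cs with | nil => rfl | cons a b => simp at hcs
    subst hnil
    simpa [pvScan] using hpre
  | succ n ih =>
    intro cs x hcs hx hpre
    cases cs with
    | nil => simpa [pvScan] using hpre
    | cons c t =>
      simp only [List.length_cons] at hcs
      cases hfind : (P.find? fun p => p.1.isPrefixOf (c :: t)) with
      | some p =>
        rw [pvScan_cons_some hfind] at hpre
        cases x with
        | nil => exact List.nil_prefix
        | cons y x' =>
          have hp2 := h2 p (List.mem_of_find?_eq_some hfind)
          cases hq : p.2 with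
          | nil => simp [hq] at hp2
          | cons b q =>
            rw [hq] at hpre hp2
            have hb : b = '<' := by simpa using hp2
            have hy : y = b := (List.cons_prefix_cons.mp (by simpa using hpre)).1
            exact absurd (by simp [hy, hb] : '<' ∈ y :: x') hx
      | none =>
        rw [pvScan_cons_none hfind] at hpre
        cases x with
        | nil => exact List.nil_prefix
        | cons y x' =>
          obtain ⟨hy, hx'⟩ := List.cons_prefix_cons.mp hpre
          subst hy
          exact List.cons_prefix_cons.mpr
            ⟨rfl, ih t x' (by omega) (fun hm => hx (List.mem_cons_of_mem _ hm)) hx'⟩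

lemma pvMaster (P : List (List Char × List Char))
    (hA : ∀ p ∈ P, p.1.head? = some '<' ∧ '<' ∉ p.1.drop 1 ∧
                   p.2.head? = some '<' ∧ '<' ∉ p.2.drop 1)
    (j : ℕ) (hj : j < P.length)
    (hB : ∀ p ∈ P.take j, ¬ P[j].1 <+: p.2 ∧ ¬ p.2 <+: P[j].1) :
    ∀ (n : ℕ) (cs : List Char), cs.length ≤ n →
      pvRepl P[j].1 P[j].2 (pvScan (P.take j) cs) = pvScan (P.take (j+1)) cs := by
  intro n
  induction n with
  | zero =>
    intro cs hcs
    have hnil : cs = [] := by cases cs with | nil => rfl | cons a b => simp at hcs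
    subst hnil
    simp [pvScan, pvRepl]
  | succ n ih =>
    intro cs hcs
    obtain ⟨hA1, hA2, hA3, hA4⟩ := hA P[j] (List.getElem_mem hj)
    have hknil : P[j].1 ≠ [] := by
      intro hh; rw [hh] at hA1; simp at hA1
    have hklen : 1 ≤ P[j].1.length := by
      cases hkk : P[j].1 with
      | nil => exact absurd hkk hknil
      | cons a b => simp
    have hkeysTake : ∀ p ∈ P.take j, p.1.head? = some '<' :=
      fun p hp => (hA p (List.mem_of_mem_take hp)).1
    have houtsTake : ∀ p ∈ P.take j, p.2.head? = some '<' :=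
      fun p hp => (hA p (List.mem_of_mem_take hp)).2.2.1
    cases cs with
    | nil => simp [pvScan, pvRepl]
    | cons c t =>
      simp only [List.length_cons] at hcs
      cases hfind : ((P.take j).find? fun p => p.1.isPrefixOf (c :: t)) with
      | some p =>
        have hmem := List.mem_of_find?_eq_some hfind
        obtain ⟨hc1, hc2⟩ := hB p hmem
        obtain ⟨hq1, hq2, hq3, hq4⟩ := hA p (List.mem_of_mem_take hmem)
        have hfind' : ((P.take (j+1)).find? fun p => p.1.isPrefixOf (c :: t)) = some p := by
          rw [← List.take_append_getElem hj, List.find?_append, hfind]; rfl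
        rw [pvScan_cons_some hfind, pvScan_cons_some hfind']
        have hp1len : 1 ≤ p.1.length := by
          cases hpp : p.1 with
          | nil => simp [hpp] at hq1
          | cons a b => simp
        rw [pvRepl_pass _ _ _ _ hA1 hq3 hq4 hc1 hc2]
        rw [ih _ (by simp only [List.length_drop]; omega)]
      | none =>
        have hnone : ∀ p ∈ P.take j, ¬ p.1 <+: (c :: t) := by
          intro p hp hpre
          have hfp := List.find?_eq_none.mp hfind p hp
          exact absurd (List.isPrefixOf_iff_prefix.mpr hpre) (by simpa using hfp)
        by_cases hkey : P[j].1 <+: (c :: t)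
        · obtain ⟨u, hu⟩ := hkey
          have hfind' : ((P.take (j+1)).find? fun p => p.1.isPrefixOf (c :: t)) = some P[j] := by
            rw [← List.take_append_getElem hj, List.find?_append, hfind]
            simp [List.find?, List.isPrefixOf_iff_prefix.mpr ⟨u, hu⟩]
          have hulen : u.length ≤ n := by
            have := congrArg List.length hu
            simp at this
            omega
          have hudrop : t.drop (P[j].1.length - 1) = u := by
            have h1 : (c :: t).drop P[j].1.length = u := by
              rw [← hu]; exact List.drop_left
            cases hkk : P[j].1.length with
            | zero => omega
            | succ k =>
              rw [hkk] at h1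
              simpa using h1
          have hs1 : pvScan (P.take j) (c :: t) = P[j].1 ++ pvScan (P.take j) u := by
            rw [← hu]
            have h0' : ∀ p ∈ P.take j, ¬ p.1 <+: (P[j].1 ++ u) := by
              rw [hu]; exact hnone
            exact pvScan_pass (P.take j) P[j].1 u hkeysTake hA2 h0' 
          rw [hs1, pvRepl_head _ _ _ hknil]
          rw [ih u hulen]
          rw [pvScan_cons_some hfind', hudrop]
        · have hfind' : ((P.take (j+1)).find? fun p => p.1.isPrefixOf (c :: t)) = none := by
            rw [← List.take_append_getElem hj, List.find?_append, hfind]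
            have hfalse : P[j].1.isPrefixOf (c :: t) = false :=
              Bool.eq_false_iff.mpr (fun hc => hkey (List.isPrefixOf_iff_prefix.mp hc))
            simp [List.find?, hfalse]
          rw [pvScan_cons_none hfind, pvScan_cons_none hfind']
          have hnotpre : ¬ P[j].1.isPrefixOf (c :: pvScan (P.take j) t) = true := by
            intro hp
            have hpp := List.isPrefixOf_iff_prefix.mp hp
            cases hkey1 : P[j].1 with
            | nil => exact hknil hkey1
            | cons o orest =>
              rw [hkey1] at hpp hA1 hA2
              have ho : o = '<' := by simpa using hA1
              obtain ⟨hoc, hrest⟩ := List.cons_prefix_cons.mp hpp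
              have horest : orest <+: t :=
                pvScan_prefix (P.take j) houtsTake n t orest (by omega)
                  (by simpa using hA2) hrest
              exact hkey (by rw [hkey1]; exact List.cons_prefix_cons.mpr ⟨hoc, horest⟩)
          rw [pvRepl, if_neg hnotpre]
          rw [ih t (by omega)]

lemma pvFold_chars (l : List (String × String)) (s : String) :
    (l.foldl (fun h p => PySem.Str.replace h p.1 p.2) s).toList
      = (l.map (fun p => (p.1.toList, p.2.toList))).foldl
          (fun h p => PySem.Chars.replace h p.1 p.2) s.toList := by
  induction l generalizing s with
  | nil => simp
  | cons p l ih =>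
    simp only [List.foldl_cons, List.map_cons]
    rw [ih (PySem.Str.replace s p.1 p.2), PySem.Str.toList_replace]

lemma pvMapping_eq : pvMapping = pvReplacements.map (fun p => (p.1.toList, p.2.toList)) := by
  rfl

lemma pv_hA : ∀ p ∈ pvMapping, p.1.head? = some '<' ∧ '<' ∉ p.1.drop 1 ∧
    p.2.head? = some '<' ∧ '<' ∉ p.2.drop 1 := by decide

lemma pv_hB : ∀ (j : ℕ) (hj : j < pvMapping.length),
    ∀ p ∈ pvMapping.take j, ¬ pvMapping[j].1 <+: p.2 ∧ ¬ p.2 <+: pvMapping[j].1 := by decide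

lemma pvLadder : ∀ (j : ℕ), j ≤ pvMapping.length →
    ∀ cs, (pvMapping.take j).foldl (fun h p => PySem.Chars.replace h p.1 p.2) cs
      = pvScan (pvMapping.take j) cs := by
  intro j
  induction j with
  | zero =>
    intro _ cs
    simpa using (pvScan_nil_pairs cs).symm
  | succ j ihj =>
    intro hj cs
    have hjlen : j < pvMapping.length := by omega
    rw [← List.take_append_getElem hjlen, List.foldl_append]
    simp only [List.foldl_cons, List.foldl_nil]
    rw [ihj (by omega) cs]
    have hknil : pvMapping[j].1 ≠ [] := by
      have := (pv_hA pvMapping[j] (List.getElem_mem hjlen)).1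
      intro hh; rw [hh] at this; simp at this
    rw [replace_eq_pvRepl _ _ _ hknil]
    rw [List.take_append_getElem hjlen]
    exact pvMaster pvMapping pv_hA j hjlen (pv_hB j hjlen) cs.length cs le_rfl

-- ===== VERDICT (by name: the statement is the Claim_ definition above) =====
theorem fb2_to_html_py_spec : Claim_equal_fb2_to_html_py := by
  intro s _
  unfold Spec_fb2_to_html_py fb2_to_html_py fb2_to_html_py_alt
  apply String.toList_inj.mp
  have h1 := pvFold_chars pvReplacements s
  rw [← pvMapping_eq] at h1
  have h2 := pvLadder pvMapping.length le_rfl s.toList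
  rw [List.take_length] at h2
  rw [h1, h2, String.toList_ofList]
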